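-- pv_equiv track=rewrite | github.com/SpectraL519/jftt-compiler | python/log_div.py | logarithmic_divide
-- ===== SOURCE A (Python) =====
-- def logarithmic_divide(a, b):
--     quotient = 0
--     if b == 0:
--         return quotient
--     if a == 0:
--         return quotient
--
--     while True:
--         if a < b:
--             break
--
--         tmp_b = b
--         multiple = 1
--         while True:
--             if a < (tmp_b << 1):
--                 break
--             tmp_b <<= 1
--             multiple <<= 1
--
--         a -= tmp_b
--         quotient += multiple
--
--     return quotient
-- ===== SOURCE B (Python) =====
-- def logarithmic_divide(a, b):
--     if b == 0 or a < b:
--         return 0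
--     return a // b
-- ===== Notes on version B (the rewrite author's own statement) =====
-- stated objective: simpler
-- what changed: The nested shift-subtract while loops are replaced by a single closed-form floor division a // b, guarded by the b == 0 and a < b cases in which A returns 0.
import Mathlib
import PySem

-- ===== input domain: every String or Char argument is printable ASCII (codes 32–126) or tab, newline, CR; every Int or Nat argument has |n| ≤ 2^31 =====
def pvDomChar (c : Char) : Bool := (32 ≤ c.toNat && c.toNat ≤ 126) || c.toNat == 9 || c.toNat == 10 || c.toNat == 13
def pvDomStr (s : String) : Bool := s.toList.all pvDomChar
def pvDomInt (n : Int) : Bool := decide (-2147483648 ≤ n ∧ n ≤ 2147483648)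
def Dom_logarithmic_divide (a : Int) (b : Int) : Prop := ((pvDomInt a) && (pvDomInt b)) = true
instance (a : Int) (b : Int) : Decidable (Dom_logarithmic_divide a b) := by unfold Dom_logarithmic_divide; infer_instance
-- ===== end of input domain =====

-- B replaces the nested shift-subtract loops with a guarded closed-form floor division.

-- ===== PORT A =====
-- inner 'while True' doubling loop; fuel makes the recursion total (A diverges outside Pre_)
def logDivInner (a : Int) : Int → Int → Nat → Int × Int
  | tmp_b, multiple, 0 => (tmp_b, multiple)
  | tmp_b, multiple, fuel + 1 =>
    if a < tmp_b * 2 then (tmp_b, multiple)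
    else logDivInner a (tmp_b * 2) (multiple * 2) fuel

-- outer 'while True' loop; F is the fuel handed to each inner loop run
def logDivOuter (b : Int) (F : Nat) : Int → Int → Nat → Int
  | _, quotient, 0 => quotient
  | a, quotient, fuel + 1 =>
    if a < b then quotient
    else
      let p := logDivInner a b 1 F
      logDivOuter b F (a - p.1) (quotient + p.2) fuel

def logarithmic_divide (a : Int) (b : Int) : Int :=
  if b = 0 then 0
  else if a = 0 then 0
  else logDivOuter b (a.toNat + 1) a 0 (a.toNat + 1)

-- ===== PORT B =====
def logarithmic_divide_alt (a : Int) (b : Int) : Int :=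
  if b = 0 ∨ a < b then 0
  else PySem.Int.floordiv a b

-- ===== PRECONDITION & SPEC =====
-- Pre_ excludes exactly the inputs (b < 0 with b ≤ a and a ≠ 0) on which A's loop diverges.
def Pre_logarithmic_divide (a : Int) (b : Int) : Prop := 0 ≤ b ∨ a < b ∨ a = 0
instance (a : Int) (b : Int) : Decidable (Pre_logarithmic_divide a b) := by
  unfold Pre_logarithmic_divide; infer_instance

def pvWitness_logarithmic_divide : Int × Int := (100, 7)

def Spec_logarithmic_divide (a : Int) (b : Int) (out : Int) : Prop := out = logarithmic_divide_alt a b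
instance (a : Int) (b : Int) (out : Int) : Decidable (Spec_logarithmic_divide a b out) := by
  unfold Spec_logarithmic_divide; infer_instance

-- ===== CLAIM (what is proved, stated in full; the proofs are below) =====
def Claim_equal_logarithmic_divide : Prop := ∀ (a : Int) (b : Int), Dom_logarithmic_divide a b → Pre_logarithmic_divide a b → Spec_logarithmic_divide a b (logarithmic_divide a b)

-- ===== LEMMAS AND PROOFS =====

-- the inner loop returns (tb·2^k, m·2^k) with tb·2^k ≤ a < tb·2^(k+1)
theorem logDivInner_spec (a : Int) :
    ∀ (fuel : Nat) (tb m : Int), 0 < tb → tb ≤ a → a.toNat - tb.toNat < fuel →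
      ∃ k : Nat, logDivInner a tb m fuel = (tb * 2 ^ k, m * 2 ^ k) ∧
        tb * 2 ^ k ≤ a ∧ a < tb * 2 ^ (k + 1) := by
  intro fuel
  induction fuel with
  | zero => intro tb m htb hle hf; omega
  | succ f ih =>
    intro tb m htb hle hf
    by_cases h : a < tb * 2
    · refine ⟨0, ?_, ?_, ?_⟩ <;> simp [logDivInner, h] <;> omega
    · rw [not_lt] at h
      have h2 : (0:Int) < tb * 2 := by omega
      obtain ⟨k, hk, hk1, hk2⟩ := ih (tb * 2) (m * 2) h2 h (by omega)
      refine ⟨k + 1, ?_, ?_, ?_⟩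
      · simp only [logDivInner, if_neg (by omega : ¬ a < tb * 2)]
        rw [hk]; simp only [Prod.mk.injEq]; constructor <;> ring
      · calc tb * 2 ^ (k + 1) = tb * 2 * 2 ^ k := by ring
          _ ≤ a := hk1
      · calc a < tb * 2 * 2 ^ (k + 1) := hk2
          _ = tb * 2 ^ (k + 1 + 1) := by ring

-- the outer loop computes quotient + a/b for 0 < b
theorem logDivOuter_spec (b : Int) (hb : 0 < b) (F : Nat) :
    ∀ (fuel : Nat) (a q : Int), a.toNat < fuel → a.toNat < F →
      logDivOuter b F a q fuel = q + if a < b then 0 else a / b := by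
  intro fuel
  induction fuel with
  | zero => intro a q hf _; omega
  | succ f ih =>
    intro a q hf hF
    by_cases h : a < b
    · simp [logDivOuter, h]
    · rw [not_lt] at h
      obtain ⟨k, hk, hk1, hk2⟩ := logDivInner_spec a F b 1 hb h (by omega)
      have hpow : (0:Int) < 2 ^ k := by positivity
      have hbk : (0:Int) < b * 2 ^ k := by positivity
      simp only [logDivOuter, if_neg (by omega : ¬ a < b), hk]
      have hrec := ih (a - b * 2 ^ k) (q + 1 * 2 ^ k) (by omega) (by omega)
      rw [hrec]
      have hdiv : (a - b * 2 ^ k) / b = a / b - 2 ^ k := by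
        have : a - b * 2 ^ k = a + (-(2 ^ k)) * b := by ring
        rw [this, Int.add_mul_ediv_right _ _ (by omega : b ≠ 0)]; ring
      by_cases h2 : a - b * 2 ^ k < b
      · have hz : a / b - 2 ^ k = 0 := by
          rw [← hdiv]
          exact Int.ediv_eq_zero_of_lt (by omega) h2
        simp only [if_pos h2]
        omega
      · simp only [if_neg h2, hdiv]
        ring
-- ===== VERDICT (by name: the statement is the Claim_ definition above) =====
theorem logarithmic_divide_spec : Claim_equal_logarithmic_divide := by
  intro a b _ hpre
  unfold Spec_logarithmic_divide logarithmic_divide logarithmic_divide_alt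
  by_cases hb0 : b = 0
  · simp [hb0]
  · simp only [if_neg hb0]
    by_cases ha : a = 0
    · -- a == 0: A's sentinel returns 0 and floordiv 0 b = 0
      simp [ha, PySem.Int.floordiv]
    · simp only [if_neg ha]
      by_cases hab : a < b
      · -- a < b: A's loop breaks at once, B's guard returns 0
        simp [logDivOuter, if_pos hab, hab]
      · -- b > 0 and b ≤ a: A's loop computes a / b
        have hb : 0 < b := by rcases hpre with h | h | h <;> omega
        rw [if_neg (by simp [hb0, hab]), PySem.Int.floordiv_eq_ediv_of_pos hb]
        rw [logDivOuter_spec b hb (a.toNat + 1) (a.toNat + 1) a 0 (by omega) (by omega)]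
        simp [hab]
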